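-- pv_equiv track=rewrite | github.com/1r0nw1ll/quantum-arithmetic-research | evals/blind_benchmark/benchmark_current_corpus.py | _score_distributions
-- ===== SOURCE A (Python) =====
-- from collections import Counter
-- from typing import Any
--
-- def _score_distributions(rows: list[dict[str, Any]]) -> dict[str, dict[str, int]]:
--     keys: set[str] = set()
--     for row in rows:
--         keys.update(row.get("scores", {}).keys())
--     out: dict[str, dict[str, int]] = {}
--     for key in sorted(keys):
--         counter = Counter(int(row["scores"][key]) for row in rows if key in row.get("scores", {}))
--         out[key] = {str(k): counter[k] for k in sorted(counter)}
--     return out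
-- ===== SOURCE B (Python) =====
-- def _fmt(inner):
--     return {str(v): inner[v] for v in sorted(inner)}
--
-- def _score_distributions(rows):
--     counts = {}
--     for row in rows:
--         for key, val in row.get("scores", {}).items():
--             inner = counts.get(key)
--             if inner is None:
--                 inner = counts[key] = {}
--             v = int(val)
--             inner[v] = inner.get(v, 0) + 1
--     return dict((key, _fmt(counts[key])) for key in sorted(counts))
-- ===== Notes on version B (the rewrite author's own statement) =====
-- stated objective: alternative
-- what changed: B builds a nested key->value->count index in one pass over all rows and then only formats it, instead of A's per-sorted-key full rescan of all rows with a fresh Counter for each key.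
import Mathlib
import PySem

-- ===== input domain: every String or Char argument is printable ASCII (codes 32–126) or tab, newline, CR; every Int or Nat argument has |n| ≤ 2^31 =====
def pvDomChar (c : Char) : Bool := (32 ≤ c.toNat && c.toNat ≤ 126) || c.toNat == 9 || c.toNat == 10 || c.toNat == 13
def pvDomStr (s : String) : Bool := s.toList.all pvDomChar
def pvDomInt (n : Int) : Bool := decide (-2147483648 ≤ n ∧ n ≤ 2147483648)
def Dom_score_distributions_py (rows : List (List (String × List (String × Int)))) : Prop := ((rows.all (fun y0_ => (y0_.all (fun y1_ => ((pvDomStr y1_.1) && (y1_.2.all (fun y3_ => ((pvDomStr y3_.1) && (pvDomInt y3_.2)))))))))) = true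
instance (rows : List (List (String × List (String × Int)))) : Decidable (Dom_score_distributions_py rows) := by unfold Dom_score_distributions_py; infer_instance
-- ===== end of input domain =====

-- B replaces A's per-sorted-key full rescan of rows (a fresh Counter per key) by one nested
-- key->value->count index built in a single pass, then a formatting pass (objective: alternative algorithm, same measured cost).

-- row.get("scores", {}) viewed as a dict (shared helper: both Pythons evaluate this expression)
def scoresOf (row : List (String × List (String × Int))) : PySem.Dict String Int :=
  PySem.Dict.ofList ((PySem.Dict.ofList row).getD "scores" [])

-- ===== PORT A =====
def score_distributions_py (rows : List (List (String × List (String × Int)))) : List (String × List (String × Int)) :=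
  -- keys = set(); for row in rows: keys.update(row.get("scores", {}).keys())
  let keys : PySem.Set String :=
    rows.foldl (fun s row => PySem.Set.update s (scoresOf row).keys) PySem.Set.empty
  -- for key in sorted(keys): counter = Counter(int(row["scores"][key]) for row in rows if key in row.get("scores", {}));
  --   out[key] = {str(k): counter[k] for k in sorted(counter)}    (int() is the identity on these int values)
  ((PySem.List.sorted keys (fun x => x) false).foldl (fun out key =>
      let counter : PySem.Dict Int Int :=
        PySem.Dict.counter
          ((rows.filter (fun row => (scoresOf row).contains key)).map
            (fun row => (scoresOf row).getD key 0))
      out.insert key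
        (((PySem.List.sorted counter.keys (fun x => x) false).foldl
            (fun d k => d.insert (PySem.Int.toStr k) (counter.getD k 0)) PySem.Dict.empty).items))
    PySem.Dict.empty).items

-- ===== PORT B =====
-- {str(v): inner[v] for v in sorted(inner)}
def fmtInner (inner : PySem.Dict Int Int) : List (String × Int) :=
  ((PySem.List.sorted inner.keys (fun x => x) false).foldl
      (fun d v => d.insert (PySem.Int.toStr v) (inner.getD v 0)) PySem.Dict.empty).items

def score_distributions_py_alt (rows : List (List (String × List (String × Int)))) : List (String × List (String × Int)) :=
  -- one pass: for key, val in row.get("scores", {}).items(): counts[key][int(val)] += 1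
  -- (Source B's get-or-create of counts[key] plus the in-place bump is exactly Dict.modify at key)
  let counts : PySem.Dict String (PySem.Dict Int Int) :=
    rows.foldl (fun c row =>
        (scoresOf row).items.foldl (fun c kv =>
            c.modify kv.1 PySem.Dict.empty (fun d => d.modify kv.2 0 (· + 1))) c)
      PySem.Dict.empty
  -- dict((key, _fmt(counts[key])) for key in sorted(counts))
  (PySem.Dict.ofList
      ((PySem.List.sorted counts.keys (fun x => x) false).map
        (fun key => (key, fmtInner (counts.getD key PySem.Dict.empty))))).items

-- ===== PRECONDITION & SPEC =====
def Spec_score_distributions_py (rows : List (List (String × List (String × Int)))) (out : List (String × List (String × Int))) : Prop := out = score_distributions_py_alt rows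
instance (rows : List (List (String × List (String × Int)))) (out : List (String × List (String × Int))) : Decidable (Spec_score_distributions_py rows out) := by unfold Spec_score_distributions_py; infer_instance

-- ===== CLAIM (what is proved, stated in full; the proofs are below) =====
def Claim_equal_score_distributions_py : Prop := ∀ (rows : List (List (String × List (String × Int)))), Dom_score_distributions_py rows → Spec_score_distributions_py rows (score_distributions_py rows)

-- ===== LEMMAS AND PROOFS =====

-- A's per-key value list (used only by the proofs)
def valsOf (key : String) (rows : List (List (String × List (String × Int)))) : List Int :=
  (rows.filter (fun row => (scoresOf row).contains key)).map (fun row => (scoresOf row).getD key 0)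

-- B's per-row loop body (used only by the proofs; definitionally the lambda in the port)
def bStep (c : PySem.Dict String (PySem.Dict Int Int)) (row : List (String × List (String × Int))) :
    PySem.Dict String (PySem.Dict Int Int) :=
  (scoresOf row).items.foldl (fun c kv =>
      c.modify kv.1 PySem.Dict.empty (fun d => d.modify kv.2 0 (· + 1))) c

-- the inner per-row fold, observed at one key
theorem innerGetD (l : List (String × Int)) (c : PySem.Dict String (PySem.Dict Int Int)) (key : String) :
    (l.foldl (fun c kv => c.modify kv.1 PySem.Dict.empty (fun d => d.modify kv.2 0 (· + 1))) c).getD key PySem.Dict.empty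
      = l.foldl (fun d kv => if kv.1 = key then d.modify kv.2 0 (· + 1) else d) (c.getD key PySem.Dict.empty) := by
  induction l generalizing c with
  | nil => rfl
  | cons a t ih =>
      simp only [List.foldl_cons, ih, PySem.Dict.getD_modify]
      by_cases h : a.1 = key
      · simp [h]
      · rw [if_neg (Ne.symm h), if_neg h]

theorem foldl_if_filter (l : List (String × Int)) (key : String) (d0 : PySem.Dict Int Int) :
    l.foldl (fun d kv => if kv.1 = key then d.modify kv.2 0 (· + 1) else d) d0
      = ((l.filter (fun kv => kv.1 == key)).map Prod.snd).foldl (fun d v => d.modify v 0 (· + 1)) d0 := by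
  induction l generalizing d0 with
  | nil => rfl
  | cons a t ih =>
      by_cases h : a.1 = key
      · simp [h, ih]
      · simp [h, ih]

theorem filter_singleton_of_nodup {α β : Type} [DecidableEq α] (l : List (α × β)) (key : α) (v : β)
    (hnd : (l.map Prod.fst).Nodup) (hm : (key, v) ∈ l) :
    l.filter (fun kv => kv.1 == key) = [(key, v)] := by
  induction l with
  | nil => cases hm
  | cons a t ih =>
      simp only [List.map_cons, List.nodup_cons] at hnd
      rcases List.mem_cons.mp hm with h | h
      · subst h
        have hfil : t.filter (fun kv => kv.1 == key) = [] := by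
          rw [List.filter_eq_nil_iff]
          intro kv hkv
          simp only [beq_iff_eq]
          intro hk
          have hmm : kv.1 ∈ t.map Prod.fst := List.mem_map_of_mem (f := Prod.fst) hkv
          rw [hk] at hmm
          exact hnd.1 hmm
        simp [hfil]
      · have ha : ¬ a.1 = key := fun hk =>
          hnd.1 (by rw [hk]; exact List.mem_map_of_mem (f := Prod.fst) h)
        simp [ha, ih hnd.2 h]

theorem dict_filter_eq (d : PySem.Dict String Int) (key : String) (hnd : d.keys.Nodup) :
    (d.items.filter (fun kv => kv.1 == key)).map Prod.snd
      = if d.contains key then [d.getD key 0] else [] := by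
  cases hc : d.contains key with
  | false =>
      have hfil : d.items.filter (fun kv => kv.1 == key) = [] := by
        rw [List.filter_eq_nil_iff]
        intro kv hkv
        simp only [beq_iff_eq]
        intro hk
        have hkey : d.contains key = true :=
          (PySem.Dict.contains_iff_mem_keys d key).mpr (hk ▸ PySem.Dict.mem_keys_of_mem_items d hkv)
        rw [hc] at hkey
        exact Bool.false_ne_true hkey
      simp [hfil]
  | true =>
      have hs : (d.get? key).isSome := by rw [← PySem.Dict.contains_eq_isSome_get?, hc]
      obtain ⟨v, hv⟩ := Option.isSome_iff_exists.mp hs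
      have hmem : (key, v) ∈ d.items := PySem.Dict.mem_items_of_get?_eq_some d hv
      rw [filter_singleton_of_nodup d.items key v (show (d.items.map Prod.fst).Nodup from hnd) hmem]
      simp [PySem.Dict.getD_of_get?_eq_some d 0 hv]

-- effect of one row on B's index, at one key
theorem rowStep (c : PySem.Dict String (PySem.Dict Int Int)) (row : List (String × List (String × Int))) (key : String) :
    (bStep c row).getD key PySem.Dict.empty
      = if (scoresOf row).contains key then
          (c.getD key PySem.Dict.empty).modify ((scoresOf row).getD key 0) 0 (· + 1)
        else c.getD key PySem.Dict.empty := by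
  unfold bStep
  rw [innerGetD, foldl_if_filter,
    dict_filter_eq (scoresOf row) key (by unfold scoresOf; exact PySem.Dict.nodup_keys_ofList _)]
  by_cases h : (scoresOf row).contains key <;> simp [h]

-- B's index, observed at one key, is exactly the Counter fold of A's per-key value list
theorem countsGetD (rows : List (List (String × List (String × Int)))) (c : PySem.Dict String (PySem.Dict Int Int)) (key : String) :
    (rows.foldl bStep c).getD key PySem.Dict.empty
      = (valsOf key rows).foldl (fun d v => d.modify v 0 (· + 1)) (c.getD key PySem.Dict.empty) := by
  induction rows generalizing c with
  | nil => rfl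
  | cons row rest ih =>
      rw [List.foldl_cons, ih]
      by_cases h : (scoresOf row).contains key
      · simp [valsOf, h, rowStep]
      · simp [valsOf, h, rowStep]

-- B's index has exactly A's key set, in the same first-occurrence order
theorem countsKeys (rows : List (List (String × List (String × Int)))) (c : PySem.Dict String (PySem.Dict Int Int)) :
    (rows.foldl bStep c).keys
      = rows.foldl (fun s row => PySem.Set.update s (scoresOf row).keys) c.keys := by
  induction rows generalizing c with
  | nil => rfl
  | cons row rest ih =>
      rw [List.foldl_cons, List.foldl_cons, ih]
      congr 1
      unfold bStep
      rw [PySem.Dict.keys_foldl_modify_key]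
      rfl

-- ===== VERDICT (by name: the statement is the Claim_ definition above) =====
theorem score_distributions_py_spec : Claim_equal_score_distributions_py := by
  intro rows _
  show score_distributions_py rows = score_distributions_py_alt rows
  simp only [score_distributions_py, score_distributions_py_alt, fmtInner,
    show (fun (c : PySem.Dict String (PySem.Dict Int Int)) row =>
        (scoresOf row).items.foldl (fun c kv =>
          c.modify kv.1 PySem.Dict.empty (fun d => d.modify kv.2 0 (· + 1))) c) = bStep from rfl]
  rw [countsKeys rows PySem.Dict.empty]
  simp only [countsGetD rows PySem.Dict.empty, PySem.Dict.getD_empty, PySem.Dict.keys_empty,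
    valsOf, PySem.Dict.counter_eq_foldl, PySem.Dict.ofList, PySem.Dict.update, List.foldl_map]
  rfl
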